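-- pv_equiv track=rewrite | github.com/MadmouseKed/Ked-Mastermind | main.py | combinaties1
-- ===== SOURCE A (Python) =====
-- def combinaties1(data):
--     resultaat = []
--     for a in data:
--         for b in data:
--             for c in data:
--                 for d in data:
--                     creatie = a+b+c+d
--                     resultaat.append(creatie)
--
--     return resultaat
-- ===== SOURCE B (Python) =====
-- def combinaties1(data):
--     partial = list(data)
--     for _ in range(3):
--         partial = [p + x for p in partial for x in data]
--     return partial
-- ===== Notes on version B (the rewrite author's own statement) =====
-- stated objective: simpler
-- what changed: Replaces the four nested loops by an incrementally extended list of partial concatenations: start from list(data) and three times extend every partial string by every element of data.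
import Mathlib
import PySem

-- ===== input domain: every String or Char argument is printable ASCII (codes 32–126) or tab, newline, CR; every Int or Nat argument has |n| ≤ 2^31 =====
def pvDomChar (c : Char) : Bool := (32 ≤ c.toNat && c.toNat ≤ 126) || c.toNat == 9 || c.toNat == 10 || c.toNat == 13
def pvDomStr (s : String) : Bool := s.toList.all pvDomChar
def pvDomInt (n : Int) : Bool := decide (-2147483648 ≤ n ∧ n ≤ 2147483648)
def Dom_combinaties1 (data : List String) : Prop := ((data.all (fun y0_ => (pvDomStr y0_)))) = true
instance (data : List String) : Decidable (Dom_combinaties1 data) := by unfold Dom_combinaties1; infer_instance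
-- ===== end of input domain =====

-- ===== PORT A =====
-- B replaces the four nested loops by an incrementally extended list of partial
-- concatenations (simpler decomposition; same output order and values).
def combinaties1 (data : List String) : List String :=
  data.foldl (fun r a =>
    data.foldl (fun r b =>
      data.foldl (fun r c =>
        data.foldl (fun r d => r ++ [a ++ b ++ c ++ d]) r) r) r) []

-- ===== PORT B =====
def combinaties1_alt (data : List String) : List String :=
  (List.range 3).foldl
    (fun acc _ => acc.flatMap (fun p => data.map (fun x => p ++ x))) data

-- ===== PRECONDITION & SPEC =====
def Spec_combinaties1 (data : List String) (out : List String) : Prop := out = combinaties1_alt data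
instance (data : List String) (out : List String) : Decidable (Spec_combinaties1 data out) := by unfold Spec_combinaties1; infer_instance

-- ===== CLAIM (what is proved, stated in full; the proofs are below) =====
def Claim_equal_combinaties1 : Prop := ∀ (data : List String), Dom_combinaties1 data → Spec_combinaties1 data (combinaties1 data)

-- ===== LEMMAS AND PROOFS =====

-- ===== VERDICT (by name: the statement is the Claim_ definition above) =====
theorem flatten_map_singleton {α β : Type} (l : List α) (g : α → β) :
    (List.map (fun x => [g x]) l).flatten = l.map g := by
  induction l with
  | nil => rfl
  | cons h t ih => simp [ih]

theorem combinaties1_A_flat (data : List String) :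
    combinaties1 data =
      data.flatMap (fun a => data.flatMap (fun b => data.flatMap (fun c =>
        data.map (fun d => a ++ b ++ c ++ d)))) := by
  simp [combinaties1, List.flatMap, flatten_map_singleton]

theorem combinaties1_spec : Claim_equal_combinaties1 := by
  intro data _
  unfold Spec_combinaties1
  rw [combinaties1_A_flat]
  simp [combinaties1_alt, List.range_succ, List.flatMap_assoc, List.flatMap_map,
    List.map_flatMap, String.append_assoc]
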